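-- pv_equiv track=rewrite | github.com/AidanWestphal/VARe-ID | VAREID/algo/postprocessing/postprocessing.py | check_numeric_equivalence
-- ===== SOURCE A (Python) =====
-- from collections import defaultdict
-- import itertools
--
-- def check_numeric_equivalence(grouped_left_wv, grouped_right_wv):
--     adj_list = {**{k: set() for k in grouped_left_wv}, **{k: set() for k in grouped_right_wv}}
--     tid_to_clusters = defaultdict(set)
--     all_grouped_wv = {**grouped_left_wv, **grouped_right_wv}
--     for cluster_key, anns in all_grouped_wv.items():
--         for ann in anns:
--             tid = ann['tracking_id']
--             if str(tid).isdigit():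
--                 tid_to_clusters[tid].add(cluster_key)
--     for clusters in tid_to_clusters.values():
--         for c1, c2 in itertools.combinations(clusters, 2):
--             if c1.endswith('_left') != c2.endswith('_left'):
--                 adj_list[c1].add(c2)
--                 adj_list[c2].add(c1)
--     return adj_list
-- ===== SOURCE B (Python) =====
-- def check_numeric_equivalence(grouped_left_wv, grouped_right_wv):
--     adj_list = {}
--     for k in list(grouped_left_wv) + list(grouped_right_wv):
--         adj_list[k] = set()
--     all_grouped_wv = dict(grouped_left_wv)
--     all_grouped_wv.update(grouped_right_wv)
--     # sides: tid -> (ordered set of '_left' clusters, ordered set of the rest),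
--     # each kept as an insertion-ordered dict used as a set
--     sides = {}
--     for cluster_key, anns in all_grouped_wv.items():
--         side = 0 if cluster_key.endswith('_left') else 1
--         for ann in anns:
--             tid = ann['tracking_id']
--             if str(tid).isdigit():
--                 sides.setdefault(tid, ({}, {}))[side][cluster_key] = None
--     for lefts, rights in sides.values():
--         for l in lefts:
--             for r in rights:
--                 adj_list[l].add(r)
--                 adj_list[r].add(l)
--     return adj_list
-- ===== Notes on version B (the rewrite author's own statement) =====
-- stated objective: alternative
-- what changed: Instead of collecting one cluster set per tracking id and scanning itertools.combinations of it with a cross-side test, B maintains per tracking id an ordered left/right partition of the clusters (built at collection time from the '_left' suffix) and links the cartesian product lefts x rights, so no same-side pair is ever generated.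
import Mathlib
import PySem

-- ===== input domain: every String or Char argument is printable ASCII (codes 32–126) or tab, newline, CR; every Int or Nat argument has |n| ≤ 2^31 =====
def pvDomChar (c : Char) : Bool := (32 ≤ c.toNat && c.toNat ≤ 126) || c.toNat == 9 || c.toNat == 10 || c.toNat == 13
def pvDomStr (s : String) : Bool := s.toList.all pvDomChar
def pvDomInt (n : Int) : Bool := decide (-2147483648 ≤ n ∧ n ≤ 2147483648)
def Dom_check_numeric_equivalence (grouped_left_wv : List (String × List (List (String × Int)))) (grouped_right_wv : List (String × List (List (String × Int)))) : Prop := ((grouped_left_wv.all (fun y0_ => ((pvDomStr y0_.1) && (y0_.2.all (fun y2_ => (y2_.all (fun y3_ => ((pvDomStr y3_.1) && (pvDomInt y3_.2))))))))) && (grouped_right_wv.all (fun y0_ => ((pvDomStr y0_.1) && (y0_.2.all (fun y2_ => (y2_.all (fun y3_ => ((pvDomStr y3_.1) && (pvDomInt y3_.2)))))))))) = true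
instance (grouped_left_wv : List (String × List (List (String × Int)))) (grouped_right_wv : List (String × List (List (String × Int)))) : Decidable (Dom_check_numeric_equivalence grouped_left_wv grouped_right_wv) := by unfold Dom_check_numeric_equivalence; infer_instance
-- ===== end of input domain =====

-- B replaces itertools.combinations over each tid's cluster set (+ cross-side test) by an ordered
-- left/right partition per tid and the cartesian product lefts × rights (objective: alternative).
-- Equivalence is about the RETURN value; neither version mutates its arguments.

-- ===== PORT A =====
-- itertools.combinations(xs, 2), in itertools' order (ported by hand; exact for r = 2)
def pvCombination2 : List String → List (String × String)
  | [] => []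
  | c :: cs => cs.map (fun x => (c, x)) ++ pvCombination2 cs

-- c1.endswith('_left') != c2.endswith('_left')
def pvCross (c1 c2 : String) : Bool := PySem.Str.endswith c1 "_left" != PySem.Str.endswith c2 "_left"

-- adj_list[c1].add(c2); adj_list[c2].add(c1)  (whenever this runs, c1 and c2 are keys of adj_list,
-- so Dict.modify with a default is exact: Python's [] lookup never raises here)
def pvAddEdge (adj : PySem.Dict String (PySem.Set String)) (c1 c2 : String) : PySem.Dict String (PySem.Set String) :=
  (adj.modify c1 PySem.Set.empty (fun s => PySem.Set.add s c2)).modify c2 PySem.Set.empty (fun s => PySem.Set.add s c1)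

-- body of A's first for-loop (one cluster_key with its anns): tid = ann['tracking_id'];
-- if str(tid).isdigit(): tid_to_clusters[tid].add(cluster_key)   (defaultdict(set))
def pvCollectA (t : PySem.Dict Int (PySem.Set String)) (kv : String × List (List (String × Int))) :
    PySem.Dict Int (PySem.Set String) :=
  kv.2.foldl (fun t ann =>
    match (PySem.Dict.ofList ann).get? "tracking_id" with
    | none => t   -- Python raises KeyError here; excluded by Pre_
    | some tid =>
      if PySem.Str.strIsdigit (PySem.Int.toStr tid) then
        t.modify tid PySem.Set.empty (fun s => PySem.Set.add s kv.1)
      else t) t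

def check_numeric_equivalence (grouped_left_wv : List (String × List (List (String × Int)))) (grouped_right_wv : List (String × List (List (String × Int)))) : List (String × List String) :=
  -- adj_list = {**{k: set() for k in grouped_left_wv}, **{k: set() for k in grouped_right_wv}}
  let adj0 := (PySem.Dict.ofList grouped_left_wv).keys.foldl
      (fun d k => d.insert k (PySem.Set.empty : PySem.Set String)) PySem.Dict.empty
  let adj1 := (PySem.Dict.ofList grouped_right_wv).keys.foldl
      (fun d k => d.insert k (PySem.Set.empty : PySem.Set String)) adj0
  -- all_grouped_wv = {**grouped_left_wv, **grouped_right_wv}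
  let allg := PySem.Dict.ofList (grouped_left_wv ++ grouped_right_wv)
  -- tid_to_clusters = defaultdict(set); for cluster_key, anns in all_grouped_wv.items(): …
  let t2c := allg.items.foldl pvCollectA PySem.Dict.empty
  -- for clusters in tid_to_clusters.values(): for c1, c2 in combinations(clusters, 2): …
  let adj2 := t2c.values.foldl (fun adj clusters =>
      (pvCombination2 clusters).foldl (fun adj p =>
        if pvCross p.1 p.2 then pvAddEdge adj p.1 p.2 else adj) adj) adj1
  adj2.items

-- ===== PORT B =====
-- adj_list[k].add(x)  (k is always a key of adj_list when this runs, so the default is never used)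
def pvTouch (adj : PySem.Dict String (PySem.Set String)) (k x : String) : PySem.Dict String (PySem.Set String) :=
  adj.modify k PySem.Set.empty (fun s => PySem.Set.add s x)

-- body of B's collection loop: the two insertion-ordered Python dicts used as sets (cluster_key -> None)
-- are exactly PySem.Set (keys in first-insertion order); [side][cluster_key] = None picks a component
def pvCollectB (s : PySem.Dict Int (PySem.Set String × PySem.Set String)) (kv : String × List (List (String × Int))) :
    PySem.Dict Int (PySem.Set String × PySem.Set String) :=
  let isL := PySem.Str.endswith kv.1 "_left"
  kv.2.foldl (fun s ann =>
    match (PySem.Dict.ofList ann).get? "tracking_id" with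
    | none => s   -- Python raises KeyError here; excluded by Pre_
    | some tid =>
      if PySem.Str.strIsdigit (PySem.Int.toStr tid) then
        s.modify tid (PySem.Set.empty, PySem.Set.empty)
          (fun lr => if isL then (PySem.Set.add lr.1 kv.1, lr.2) else (lr.1, PySem.Set.add lr.2 kv.1))
      else s) s

def check_numeric_equivalence_alt (grouped_left_wv : List (String × List (List (String × Int)))) (grouped_right_wv : List (String × List (List (String × Int)))) : List (String × List String) :=
  -- adj_list = {}; for k in list(grouped_left_wv) + list(grouped_right_wv): adj_list[k] = set()
  let adj0 := ((PySem.Dict.ofList grouped_left_wv).keys ++ (PySem.Dict.ofList grouped_right_wv).keys).foldl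
      (fun d k => d.insert k (PySem.Set.empty : PySem.Set String)) PySem.Dict.empty
  -- all_grouped_wv = dict(grouped_left_wv); all_grouped_wv.update(grouped_right_wv)
  let allg := (PySem.Dict.ofList grouped_left_wv).update grouped_right_wv
  -- sides: tid -> (ordered set of '_left' clusters, ordered set of the rest)
  let sides := allg.items.foldl pvCollectB PySem.Dict.empty
  -- for lefts, rights in sides.values(): for l in lefts: for r in rights: link l and r
  let adj2 := sides.values.foldl (fun adj lr =>
      lr.1.foldl (fun adj l => lr.2.foldl (fun adj r => pvTouch (pvTouch adj l r) r l) adj) adj) adj0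
  adj2.items

-- ===== PRECONDITION & SPEC =====
-- Pre_ excludes exactly the inputs on which the Python A raises KeyError: some annotation dict the
-- loop reaches (i.e. in the merged dict's values) has no 'tracking_id' key.
def Pre_check_numeric_equivalence (grouped_left_wv : List (String × List (List (String × Int)))) (grouped_right_wv : List (String × List (List (String × Int)))) : Prop :=
  ∀ kv ∈ (PySem.Dict.ofList (grouped_left_wv ++ grouped_right_wv)).items,
    ∀ ann ∈ kv.2, "tracking_id" ∈ ann.map (·.1)
instance (grouped_left_wv : List (String × List (List (String × Int)))) (grouped_right_wv : List (String × List (List (String × Int)))) : Decidable (Pre_check_numeric_equivalence grouped_left_wv grouped_right_wv) := by unfold Pre_check_numeric_equivalence; infer_instance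

def pvWitness_check_numeric_equivalence : (List (String × List (List (String × Int)))) × (List (String × List (List (String × Int)))) :=
  ([("a_left", [[("tracking_id", 1)]])], [("a_right", [[("tracking_id", 1)]])])

def Spec_check_numeric_equivalence (grouped_left_wv : List (String × List (List (String × Int)))) (grouped_right_wv : List (String × List (List (String × Int)))) (out : List (String × List String)) : Prop := out = check_numeric_equivalence_alt grouped_left_wv grouped_right_wv
instance (grouped_left_wv : List (String × List (List (String × Int)))) (grouped_right_wv : List (String × List (List (String × Int)))) (out : List (String × List String)) : Decidable (Spec_check_numeric_equivalence grouped_left_wv grouped_right_wv out) := by unfold Spec_check_numeric_equivalence; infer_instance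

-- ===== CLAIM (what is proved, stated in full; the proofs are below) =====
def Claim_equal_check_numeric_equivalence : Prop := ∀ (grouped_left_wv : List (String × List (List (String × Int)))) (grouped_right_wv : List (String × List (List (String × Int)))), Dom_check_numeric_equivalence grouped_left_wv grouped_right_wv → Pre_check_numeric_equivalence grouped_left_wv grouped_right_wv → Spec_check_numeric_equivalence grouped_left_wv grouped_right_wv (check_numeric_equivalence grouped_left_wv grouped_right_wv)

-- ===== LEMMAS AND PROOFS =====
-- The two ports are proved equal (the Pre_ hypothesis is not needed: on an input where Python would
-- raise, both ports skip the same annotation, so they still agree).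

def pvTouchP (adj : PySem.Dict String (PySem.Set String)) (q : String × String) : PySem.Dict String (PySem.Set String) := pvTouch adj q.1 q.2
def pvExpandA (p : String × String) : List (String × String) := if pvCross p.1 p.2 then [(p.1,p.2),(p.2,p.1)] else []
def pvQA (cs : List String) : List (String × String) := (pvCombination2 cs).flatMap pvExpandA
def pvQB (lf rt : List String) : List (String × String) := lf.flatMap (fun l => rt.flatMap (fun r => [(l,r),(r,l)]))
def pvL (c : String) : Bool := PySem.Str.endswith c "_left"
def pvPartners (k : String) (qs : List (String × String)) : List String := (qs.filter (fun q => q.1 == k)).map (·.2)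

theorem pv_foldA_eq (ps : List (String × String)) (adj : PySem.Dict String (PySem.Set String)) :
    ps.foldl (fun adj p => if pvCross p.1 p.2 then pvAddEdge adj p.1 p.2 else adj) adj
      = (ps.flatMap pvExpandA).foldl pvTouchP adj := by
  induction ps generalizing adj with
  | nil => rfl
  | cons p ps ih =>
    simp only [List.foldl_cons, List.flatMap_cons, List.foldl_append, pvExpandA]
    by_cases h : pvCross p.1 p.2 = true
    · rw [if_pos h, if_pos h, ih]
      rfl
    · rw [if_neg h, if_neg h]
      simpa using ih adj

theorem pv_foldB_inner (l : String) (rt : List String) (adj : PySem.Dict String (PySem.Set String)) :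
    rt.foldl (fun adj r => pvTouch (pvTouch adj l r) r l) adj
      = (rt.flatMap (fun r => [(l,r),(r,l)])).foldl pvTouchP adj := by
  induction rt generalizing adj with
  | nil => rfl
  | cons r rt ih =>
    simp only [List.foldl_cons, List.flatMap_cons, List.foldl_append, List.foldl_nil]
    exact ih _

theorem pv_foldB_eq (lf rt : List String) (adj : PySem.Dict String (PySem.Set String)) :
    lf.foldl (fun adj l => rt.foldl (fun adj r => pvTouch (pvTouch adj l r) r l) adj) adj
      = (pvQB lf rt).foldl pvTouchP adj := by
  induction lf generalizing adj with
  | nil => rfl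
  | cons l lf ih =>
    simp only [List.foldl_cons, pvQB, List.flatMap_cons, List.foldl_append]
    rw [pv_foldB_inner, ih]
    rfl

theorem pv_getD_foldl_touch (qs : List (String × String)) (adj : PySem.Dict String (PySem.Set String)) (k : String) :
    ((qs.foldl pvTouchP adj).getD k PySem.Set.empty)
      = PySem.Set.update (adj.getD k PySem.Set.empty) (pvPartners k qs) := by
  induction qs generalizing adj with
  | nil => simp [pvPartners, PySem.Set.update]
  | cons q qs ih =>
    rw [List.foldl_cons, ih]
    have hg : (pvTouchP adj q).getD k PySem.Set.empty
        = if k = q.1 then PySem.Set.add (adj.getD q.1 PySem.Set.empty) q.2 else adj.getD k PySem.Set.empty := by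
      simp [pvTouchP, pvTouch, PySem.Dict.getD_modify]
    rw [hg]
    by_cases h : k = q.1
    · subst h
      simp [pvPartners, PySem.Set.update_cons]
    · rw [if_neg h]
      have hp : pvPartners k (q :: qs) = pvPartners k qs := by
        simp only [pvPartners, List.filter_cons]
        rw [if_neg (fun hh : (q.1 == k) = true => h (LawfulBEq.eq_of_beq hh).symm)]
      rw [hp]

theorem pv_keys_foldl_touch (qs : List (String × String)) (adj : PySem.Dict String (PySem.Set String))
    (h : ∀ q ∈ qs, q.1 ∈ adj.keys) :
    (qs.foldl pvTouchP adj).keys = adj.keys := by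
  induction qs generalizing adj with
  | nil => rfl
  | cons q qs ih =>
    have hc : adj.contains q.1 = true := (PySem.Dict.contains_iff_mem_keys adj q.1).mpr (h q (by simp))
    have hk : (pvTouchP adj q).keys = adj.keys := by
      simp [pvTouchP, pvTouch, PySem.Dict.keys_modify, PySem.Dict.keys_insert_of_contains _ _ hc]
    rw [List.foldl_cons, ih _ (by intro q' hq'; rw [hk]; exact h q' (by simp [hq'])), hk]

theorem pvPartners_flatMap {α : Type} (k : String) (g : α → List (String × String)) (xs : List α) :
    pvPartners k (xs.flatMap g) = xs.flatMap (fun x => pvPartners k (g x)) := by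
  simp [pvPartners, List.filter_flatMap, List.map_flatMap]

theorem pvPartners_append (k : String) (a b : List (String × String)) :
    pvPartners k (a ++ b) = pvPartners k a ++ pvPartners k b := by
  simp [pvPartners]

theorem pvPartners_eq_nil (k : String) (qs : List (String × String)) (h : ∀ q ∈ qs, q.1 ≠ k) :
    pvPartners k qs = [] := by
  simp only [pvPartners, List.map_eq_nil_iff]
  exact List.filter_eq_nil_iff.mpr (fun q hq => by simp [h q hq])

theorem pv_flatMap_single {α β : Type} [DecidableEq α] (cs : List α) (hnd : cs.Nodup) (k : α)
    (g : α → List β) (h : ∀ x ∈ cs, x ≠ k → g x = []) :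
    cs.flatMap g = if k ∈ cs then g k else [] := by
  induction cs with
  | nil => simp
  | cons c cs ih =>
    simp only [List.flatMap_cons]
    by_cases hc : c = k
    · subst hc
      have hnil : cs.flatMap g = [] := by
        simp only [List.flatMap_eq_nil_iff]
        intro x hx
        exact h x (by simp [hx]) (fun hxk => (List.nodup_cons.mp hnd).1 (hxk ▸ hx))
      simp [hnil]
    · rw [h c (by simp) hc]
      have hmem : (k ∈ c :: cs) ↔ (k ∈ cs) := by
        simp only [List.mem_cons, or_iff_right_iff_imp]
        intro hk; exact absurd hk.symm hc
      rw [ih (List.nodup_cons.mp hnd).2 (fun x hx => h x (by simp [hx]))]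
      rw [if_congr hmem rfl rfl]
      simp

theorem pv_flatMap_if_singleton {α : Type} (cs : List α) (p : α → Bool) :
    cs.flatMap (fun x => if p x then [x] else []) = cs.filter p := by
  induction cs with
  | nil => rfl
  | cons c cs ih =>
    by_cases h : p c <;> simp [h, ih]

theorem pvPartners_pair (k l r : String) :
    pvPartners k [(l, r), (r, l)]
      = (if l = k then [r] else []) ++ (if r = k then [l] else []) := by
  by_cases h1 : l = k <;> by_cases h2 : r = k <;>
    simp [pvPartners, List.filter_cons, h1, h2]


theorem pv_mem_comb2 (cs : List String) (p : String × String) (h : p ∈ pvCombination2 cs) :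
    p.1 ∈ cs ∧ p.2 ∈ cs := by
  induction cs with
  | nil => simp [pvCombination2] at h
  | cons c cs ih =>
    simp only [pvCombination2, List.mem_append, List.mem_map] at h
    rcases h with ⟨x, hx, hp⟩ | h
    · subst hp; exact ⟨by simp, by simp [hx]⟩
    · exact ⟨by simp [(ih h).1], by simp [(ih h).2]⟩

theorem pv_mem_expandA (p q : String × String) (h : q ∈ pvExpandA p) :
    q = (p.1, p.2) ∨ q = (p.2, p.1) := by
  by_cases hc : pvCross p.1 p.2 = true <;> simp [pvExpandA, hc] at h <;> tauto

theorem pv_mem_pvQA (cs : List String) (q : String × String) (h : q ∈ pvQA cs) :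
    q.1 ∈ cs ∧ q.2 ∈ cs := by
  simp only [pvQA, List.mem_flatMap] at h
  obtain ⟨p, hp, hq⟩ := h
  have hm := pv_mem_comb2 cs p hp
  rcases pv_mem_expandA p q hq with h | h <;> subst h
  · exact ⟨hm.1, hm.2⟩
  · exact ⟨hm.2, hm.1⟩

theorem pv_mem_pvQB (lf rt : List String) (q : String × String) (h : q ∈ pvQB lf rt) :
    (q.1 ∈ lf ∨ q.1 ∈ rt) ∧ (q.2 ∈ lf ∨ q.2 ∈ rt) := by
  simp only [pvQB, List.mem_flatMap] at h
  obtain ⟨l, hl, r, hr, hq⟩ := h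
  simp only [List.mem_cons] at hq
  rcases hq with hq | hq | hq
  · subst hq; exact ⟨Or.inl hl, Or.inr hr⟩
  · subst hq; exact ⟨Or.inr hr, Or.inl hl⟩
  · simp at hq

theorem pvPartners_expandA (k c x : String) :
    pvPartners k (pvExpandA (c, x))
      = if pvCross c x then ((if c = k then [x] else []) ++ (if x = k then [c] else [])) else [] := by
  by_cases hc : pvCross c x = true
  · simp only [pvExpandA, hc, if_pos]
    exact pvPartners_pair k c x
  · simp [pvExpandA, hc, pvPartners]

theorem pv_cross_fst_true {c x : String} (h : pvL c = true) : pvCross c x = !pvL x := by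
  simp only [pvL] at h
  simp only [pvCross, h, pvL]
  cases hx : PySem.Str.endswith x "_left" <;> simp [hx]

theorem pv_cross_fst_false {c x : String} (h : pvL c = false) : pvCross c x = pvL x := by
  simp only [pvL] at h
  simp only [pvCross, h, pvL]
  cases hx : PySem.Str.endswith x "_left" <;> simp [hx]

theorem pv_cross_snd_true {c x : String} (h : pvL x = true) : pvCross c x = !pvL c := by
  simp only [pvL] at h
  simp only [pvCross, h, pvL]
  cases hc : PySem.Str.endswith c "_left" <;> simp [hc]

theorem pv_cross_snd_false {c x : String} (h : pvL x = false) : pvCross c x = pvL c := by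
  simp only [pvL] at h
  simp only [pvCross, h, pvL]
  cases hc : PySem.Str.endswith c "_left" <;> simp [hc]

theorem pvPartnersA (k : String) (cs : List String) (hnd : cs.Nodup) :
    pvPartners k (pvQA cs)
      = if k ∈ cs then (if pvL k then cs.filter (fun c => !pvL c) else cs.filter pvL) else [] := by
  induction cs with
  | nil => simp [pvQA, pvCombination2, pvPartners]
  | cons c cs ih =>
    have hnotmem := (List.nodup_cons.mp hnd).1
    have hnd2 := (List.nodup_cons.mp hnd).2
    have hQA : pvQA (c :: cs) = (cs.map (fun x => (c, x))).flatMap pvExpandA ++ pvQA cs := by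
      simp [pvQA, pvCombination2]
    rw [hQA, pvPartners_append, pvPartners_flatMap]
    have hhead : (cs.map (fun x => (c, x))).flatMap (fun p => pvPartners k (pvExpandA p))
        = cs.flatMap (fun x => pvPartners k (pvExpandA (c, x))) := by
      rw [List.flatMap_map]
    rw [hhead]
    by_cases hck : c = k
    · subst hck
      have h1 : cs.flatMap (fun x => pvPartners c (pvExpandA (c, x)))
          = cs.filter (fun x => pvCross c x) := by
        rw [← pv_flatMap_if_singleton cs (fun x => pvCross c x)]
        apply List.flatMap_congr
        intro x hx
        rw [pvPartners_expandA]
        have hxc : ¬x = c := fun hh => hnotmem (hh ▸ hx)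
        by_cases hcr : pvCross c x = true
        · simp [hcr, hxc]
        · simp [hcr]
      have h2 : pvPartners c (pvQA cs) = [] :=
        pvPartners_eq_nil _ _ (fun q hq hq1 => hnotmem (hq1 ▸ (pv_mem_pvQA cs q hq).1))
      rw [h1, h2, List.append_nil, if_pos (List.mem_cons_self)]
      by_cases hL : pvL c = true
      · rw [if_pos hL, List.filter_cons, if_neg (by simp [hL])]
        exact List.filter_congr (fun x _ => pv_cross_fst_true hL)
      · have hL' : pvL c = false := eq_false_of_ne_true hL
        rw [if_neg hL, List.filter_cons, if_neg (by simp [hL'])]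
        exact List.filter_congr (fun x _ => pv_cross_fst_false hL')
    · have h1 : cs.flatMap (fun x => pvPartners k (pvExpandA (c, x)))
          = if k ∈ cs then (if pvCross c k then [c] else []) else [] := by
        rw [pv_flatMap_single cs hnd2 k _ ?side]
        case side =>
          intro x hx hxk
          rw [pvPartners_expandA]
          by_cases hcr : pvCross c x = true
          · simp [hcr, hck, hxk]
          · simp [hcr]
        rw [pvPartners_expandA]
        by_cases hcr : pvCross c k = true
        · simp [hcr, hck]
        · simp [hcr]
      rw [h1, ih hnd2]
      by_cases hk : k ∈ cs
      · rw [if_pos hk, if_pos hk, if_pos (List.mem_cons_of_mem _ hk)]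
        by_cases hL : pvL k = true
        · rw [if_pos hL, if_pos hL, pv_cross_snd_true hL, List.filter_cons]
          cases hc : pvL c <;> simp [hc]
        · have hL' : pvL k = false := eq_false_of_ne_true hL
          rw [if_neg hL, if_neg hL, pv_cross_snd_false hL', List.filter_cons]
          cases hc : pvL c <;> simp [hc]
      · rw [if_neg hk, if_neg hk,
          if_neg (by simp only [List.mem_cons, not_or]; exact ⟨fun hh => hck hh.symm, hk⟩)]
        simp

theorem pvPartnersB (k : String) (lf rt : List String) (hlf : lf.Nodup) (hrt : rt.Nodup)
    (hdisj : ∀ x ∈ lf, x ∉ rt) :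
    pvPartners k (pvQB lf rt) = if k ∈ lf then rt else if k ∈ rt then lf else [] := by
  rw [pvQB, pvPartners_flatMap]
  have hinner : ∀ l, pvPartners k (rt.flatMap (fun r => [(l, r), (r, l)]))
      = rt.flatMap (fun r => (if l = k then [r] else []) ++ (if r = k then [l] else [])) := by
    intro l
    rw [pvPartners_flatMap]
    exact List.flatMap_congr (fun r _ => pvPartners_pair k l r)
  rw [List.flatMap_congr (fun l _ => hinner l)]
  by_cases hk : k ∈ lf
  · have hknr : k ∉ rt := hdisj k hk
    rw [if_pos hk]
    rw [pv_flatMap_single lf hlf k _ ?side]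
    case side =>
      intro l _ hlk
      simp only [List.flatMap_eq_nil_iff]
      intro r hr
      have : ¬r = k := fun hh => hknr (hh ▸ hr)
      simp [hlk, this]
    rw [if_pos hk]
    rw [List.flatMap_congr (g := fun r => [r]) ?inner]
    · exact List.flatMap_singleton' rt
    case inner =>
      intro r hr
      have : ¬r = k := fun hh => hknr (hh ▸ hr)
      simp [this]
  · rw [if_neg hk]
    by_cases hk2 : k ∈ rt
    · rw [if_pos hk2]
      have hstep : ∀ l ∈ lf,
          rt.flatMap (fun r => (if l = k then [r] else []) ++ (if r = k then [l] else [])) = [l] := by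
        intro l hl
        have hlk : ¬l = k := fun hh => hk (hh ▸ hl)
        have h1 : rt.flatMap (fun r => (if l = k then [r] else []) ++ (if r = k then [l] else []))
            = rt.flatMap (fun r => if r = k then [l] else []) :=
          List.flatMap_congr (fun r _ => by simp [hlk])
        rw [h1, pv_flatMap_single rt hrt k _ (fun x _ hxk => by simp [hxk]), if_pos hk2, if_pos rfl]
      rw [List.flatMap_congr hstep]
      exact List.flatMap_singleton' lf
    · rw [if_neg hk2]
      simp only [List.flatMap_eq_nil_iff]
      intro l hl r hr
      have h1 : ¬l = k := fun hh => hk (hh ▸ hl)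
      have h2 : ¬r = k := fun hh => hk2 (hh ▸ hr)
      simp [h1, h2]

theorem pv_pair_phase (cs : List String) (hnd : cs.Nodup) (adj : PySem.Dict String (PySem.Set String))
    (hin : ∀ c ∈ cs, c ∈ adj.keys) (hknd : adj.keys.Nodup) :
    (pvQA cs).foldl pvTouchP adj
      = (pvQB (cs.filter pvL) (cs.filter (fun c => !pvL c))).foldl pvTouchP adj := by
  have hAk : ∀ q ∈ pvQA cs, q.1 ∈ adj.keys := fun q hq => hin _ (pv_mem_pvQA cs q hq).1
  have hBk : ∀ q ∈ pvQB (cs.filter pvL) (cs.filter (fun c => !pvL c)), q.1 ∈ adj.keys := by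
    intro q hq
    rcases (pv_mem_pvQB _ _ q hq).1 with h | h <;> exact hin _ (List.mem_of_mem_filter h)
  have hkA := pv_keys_foldl_touch _ adj hAk
  have hkB := pv_keys_foldl_touch _ adj hBk
  apply PySem.Dict.ext
  rw [PySem.Dict.items_eq_map_keys _ (by rw [hkA]; exact hknd) PySem.Set.empty,
      PySem.Dict.items_eq_map_keys _ (by rw [hkB]; exact hknd) PySem.Set.empty, hkA, hkB]
  apply List.map_congr_left
  intro k _
  rw [pv_getD_foldl_touch, pv_getD_foldl_touch]
  have hpart : pvPartners k (pvQA cs)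
      = pvPartners k (pvQB (cs.filter pvL) (cs.filter (fun c => !pvL c))) := by
    rw [pvPartnersA k cs hnd, pvPartnersB k _ _ (hnd.filter _) (hnd.filter _) ?disj]
    case disj =>
      intro x hx hx2
      have h1 := List.of_mem_filter hx
      have h2 := List.of_mem_filter hx2
      rw [h1] at h2
      simp at h2
    by_cases hk : k ∈ cs
    · by_cases hL : pvL k = true
      · rw [if_pos hk, if_pos hL, if_pos (List.mem_filter.mpr ⟨hk, hL⟩)]
      · have hL' : pvL k = false := eq_false_of_ne_true hL
        rw [if_pos hk, if_neg hL, if_neg (fun hh => hL (List.of_mem_filter hh)),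
          if_pos (List.mem_filter.mpr ⟨hk, by simp [hL']⟩)]
    · rw [if_neg hk, if_neg (fun hh => hk (List.mem_of_mem_filter hh)),
        if_neg (fun hh => hk (List.mem_of_mem_filter hh))]
  rw [hpart]

theorem pv_outer (vs : List (List String)) (adj : PySem.Dict String (PySem.Set String))
    (hknd : adj.keys.Nodup)
    (h : ∀ cs ∈ vs, cs.Nodup ∧ ∀ c ∈ cs, c ∈ adj.keys) :
    vs.foldl (fun adj clusters =>
        (pvCombination2 clusters).foldl (fun adj p =>
          if pvCross p.1 p.2 then pvAddEdge adj p.1 p.2 else adj) adj) adj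
      = (vs.map (fun cs => (cs.filter pvL, cs.filter (fun c => !pvL c)))).foldl
          (fun adj lr => lr.1.foldl (fun adj l =>
            lr.2.foldl (fun adj r => pvTouch (pvTouch adj l r) r l) adj) adj) adj := by
  induction vs generalizing adj with
  | nil => rfl
  | cons cs vs ih =>
    simp only [List.foldl_cons, List.map_cons]
    have hcs := h cs (by simp)
    have hBk : ∀ q ∈ pvQB (cs.filter pvL) (cs.filter (fun c => !pvL c)), q.1 ∈ adj.keys := by
      intro q hq
      rcases (pv_mem_pvQB _ _ q hq).1 with hh | hh <;> exact hcs.2 _ (List.mem_of_mem_filter hh)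
    have estep : (pvCombination2 cs).foldl (fun adj p =>
          if pvCross p.1 p.2 then pvAddEdge adj p.1 p.2 else adj) adj
        = (cs.filter pvL).foldl (fun adj l =>
            (cs.filter (fun c => !pvL c)).foldl (fun adj r => pvTouch (pvTouch adj l r) r l) adj) adj := by
      rw [pv_foldA_eq, pv_foldB_eq]
      exact pv_pair_phase cs hcs.1 adj hcs.2 hknd
    rw [estep]
    have hkeys : ((cs.filter pvL).foldl (fun adj l =>
          (cs.filter (fun c => !pvL c)).foldl (fun adj r => pvTouch (pvTouch adj l r) r l) adj) adj).keys
        = adj.keys := by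
      rw [pv_foldB_eq]
      exact pv_keys_foldl_touch _ adj hBk
    apply ih
    · rw [hkeys]; exact hknd
    · intro cs' hcs'
      refine ⟨(h cs' (by simp [hcs'])).1, fun c hc => ?_⟩
      rw [hkeys]
      exact (h cs' (by simp [hcs'])).2 c hc

theorem pv_filter_add (cs : List String) (x : String) (p : String → Bool) :
    (PySem.Set.add cs x).filter p = if p x then PySem.Set.add (cs.filter p) x else cs.filter p := by
  by_cases hm : x ∈ cs
  · rw [PySem.Set.add_of_mem hm]
    by_cases hp : p x = true
    · rw [if_pos hp, PySem.Set.add_of_mem (List.mem_filter.mpr ⟨hm, hp⟩)]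
    · rw [if_neg hp]
  · rw [PySem.Set.add_of_not_mem hm, List.filter_append]
    have hnm : x ∉ cs.filter p := fun hh => hm (List.mem_of_mem_filter hh)
    by_cases hp : p x = true
    · rw [if_pos hp, PySem.Set.add_of_not_mem hnm]
      simp [hp]
    · rw [if_neg hp]
      simp [hp]

def pvRel (t : PySem.Dict Int (PySem.Set String))
    (s : PySem.Dict Int (PySem.Set String × PySem.Set String)) (K : List String) : Prop :=
  s.keys = t.keys ∧ t.keys.Nodup
  ∧ (∀ tid, (t.getD tid PySem.Set.empty).Nodup)
  ∧ (∀ tid, ∀ c ∈ t.getD tid PySem.Set.empty, c ∈ K)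
  ∧ (∀ tid, s.getD tid (PySem.Set.empty, PySem.Set.empty)
      = ((t.getD tid PySem.Set.empty).filter pvL,
         (t.getD tid PySem.Set.empty).filter (fun c => !pvL c)))

theorem pvRel_single (t : PySem.Dict Int (PySem.Set String))
    (s : PySem.Dict Int (PySem.Set String × PySem.Set String)) (K : List String)
    (ck : String) (hck : ck ∈ K) (tid : Int) (h : pvRel t s K) :
    pvRel (t.modify tid PySem.Set.empty (fun v => PySem.Set.add v ck))
      (s.modify tid (PySem.Set.empty, PySem.Set.empty)
        (fun lr => if PySem.Str.endswith ck "_left" then (PySem.Set.add lr.1 ck, lr.2)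
                   else (lr.1, PySem.Set.add lr.2 ck))) K := by
  obtain ⟨hkeys, hnd, hvnd, hvK, hval⟩ := h
  have hcont : s.contains tid = t.contains tid := by
    rw [PySem.Dict.contains_eq_decide_mem_keys, PySem.Dict.contains_eq_decide_mem_keys, hkeys]
  refine ⟨?_, ?_, ?_, ?_, ?_⟩
  · rw [PySem.Dict.keys_modify, PySem.Dict.keys_modify]
    by_cases hc : t.contains tid = true
    · rw [PySem.Dict.keys_insert_of_contains _ _ (hcont ▸ hc),
        PySem.Dict.keys_insert_of_contains _ _ hc, hkeys]
    · rw [PySem.Dict.keys_insert_of_not_contains _ _ (by rw [hcont]; exact eq_false_of_ne_true hc),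
        PySem.Dict.keys_insert_of_not_contains _ _ (eq_false_of_ne_true hc), hkeys]
  · rw [PySem.Dict.keys_modify]
    by_cases hc : t.contains tid = true
    · rw [PySem.Dict.keys_insert_of_contains _ _ hc]; exact hnd
    · rw [PySem.Dict.keys_insert_of_not_contains _ _ (eq_false_of_ne_true hc)]
      simp only [List.nodup_append, List.nodup_singleton]
      refine ⟨hnd, trivial, ?_⟩
      intro a ha b hb
      rw [List.mem_singleton] at hb
      subst hb
      intro hab
      subst hab
      exact hc ((PySem.Dict.contains_iff_mem_keys t a).mpr ha)
  · intro tid'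
    rw [PySem.Dict.getD_modify]
    by_cases he : tid' = tid
    · rw [if_pos he]
      exact PySem.Set.nodup_add _ _ (hvnd tid)
    · rw [if_neg he]
      exact hvnd tid'
  · intro tid' c hc
    rw [PySem.Dict.getD_modify] at hc
    by_cases he : tid' = tid
    · rw [if_pos he] at hc
      rcases (PySem.Set.mem_add _ _ _).mp hc with hc | hc
      · exact hvK tid c hc
      · exact hc ▸ hck
    · rw [if_neg he] at hc
      exact hvK tid' c hc
  · intro tid'
    rw [PySem.Dict.getD_modify, PySem.Dict.getD_modify]
    by_cases he : tid' = tid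
    · rw [if_pos he, if_pos he, hval tid]
      by_cases hL : PySem.Str.endswith ck "_left" = true
    
      · rw [if_pos hL]
        rw [pv_filter_add _ _ pvL, pv_filter_add _ _ (fun c => !pvL c)]
        have h1 : pvL ck = true := hL
        rw [if_pos h1]
        simp [h1]
      · have hL' : PySem.Str.endswith ck "_left" = false := eq_false_of_ne_true hL
        rw [if_neg hL]
        rw [pv_filter_add _ _ pvL, pv_filter_add _ _ (fun c => !pvL c)]
        have h1 : pvL ck = false := hL'
        rw [if_neg (by simp [h1])]
        simp [h1]
    · rw [if_neg he, if_neg he]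
      exact hval tid'

theorem pvRel_step (t : PySem.Dict Int (PySem.Set String))
    (s : PySem.Dict Int (PySem.Set String × PySem.Set String)) (K : List String)
    (kv : String × List (List (String × Int))) (hck : kv.1 ∈ K) (h : pvRel t s K) :
    pvRel (pvCollectA t kv) (pvCollectB s kv) K := by
  obtain ⟨ck, anns⟩ := kv
  simp only [pvCollectA, pvCollectB] at *
  induction anns generalizing t s with
  | nil => exact h
  | cons ann anns ih =>
    simp only [List.foldl_cons]
    apply ih
    cases hg : (PySem.Dict.ofList ann).get? "tracking_id" with
    | none => exact h
    | some tid =>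
      dsimp only
      by_cases hd : PySem.Str.strIsdigit (PySem.Int.toStr tid) = true
      · rw [if_pos hd, if_pos hd]
        exact pvRel_single t s K ck hck tid h
      · rw [if_neg hd, if_neg hd]
        exact h

theorem pvRel_fold (items : List (String × List (List (String × Int))))
    (t : PySem.Dict Int (PySem.Set String))
    (s : PySem.Dict Int (PySem.Set String × PySem.Set String)) (K : List String)
    (hks : ∀ kv ∈ items, kv.1 ∈ K) (h : pvRel t s K) :
    pvRel (items.foldl pvCollectA t) (items.foldl pvCollectB s) K := by
  induction items generalizing t s with
  | nil => exact h
  | cons kv items ih =>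
    simp only [List.foldl_cons]
    exact ih _ _ (fun kv' h' => hks kv' (by simp [h'])) (pvRel_step t s K kv (hks kv (by simp)) h)


theorem pv_main (L R : List (String × List (List (String × Int)))) :
    check_numeric_equivalence L R = check_numeric_equivalence_alt L R := by
  unfold check_numeric_equivalence check_numeric_equivalence_alt
  dsimp only
  have hadj : (PySem.Dict.ofList R).keys.foldl (fun d k => d.insert k (PySem.Set.empty : PySem.Set String))
        ((PySem.Dict.ofList L).keys.foldl (fun d k => d.insert k (PySem.Set.empty : PySem.Set String)) PySem.Dict.empty)
      = ((PySem.Dict.ofList L).keys ++ (PySem.Dict.ofList R).keys).foldl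
          (fun d k => d.insert k (PySem.Set.empty : PySem.Set String)) PySem.Dict.empty :=
    (List.foldl_append ..).symm
  have hallg : (PySem.Dict.ofList L).update R = PySem.Dict.ofList (L ++ R) := by
    simp [PySem.Dict.ofList, PySem.Dict.update, List.foldl_append]
  rw [hadj, hallg]
  have hrel : pvRel ((PySem.Dict.ofList (L ++ R)).items.foldl pvCollectA PySem.Dict.empty)
      ((PySem.Dict.ofList (L ++ R)).items.foldl pvCollectB PySem.Dict.empty)
      (PySem.Dict.ofList (L ++ R)).keys := by
    apply pvRel_fold
    · exact fun kv hkv => PySem.Dict.mem_keys_of_mem_items _ hkv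
    · refine ⟨rfl, by simp, fun tid => by simp [PySem.Dict.getD_empty], ?_, fun tid => by simp [PySem.Dict.getD_empty]⟩
      intro tid c hc
      simp [PySem.Dict.getD_empty] at hc
  obtain ⟨hkeys, hnd, hvnd, hvK, hval⟩ := hrel
  have hvalues : ((PySem.Dict.ofList (L ++ R)).items.foldl pvCollectB PySem.Dict.empty).values
      = ((PySem.Dict.ofList (L ++ R)).items.foldl pvCollectA PySem.Dict.empty).values.map
          (fun cs => (cs.filter pvL, cs.filter (fun c => !pvL c))) := by
    rw [PySem.Dict.values_eq_map_keys _ (by rw [hkeys]; exact hnd) (PySem.Set.empty, PySem.Set.empty),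
      PySem.Dict.values_eq_map_keys _ hnd PySem.Set.empty, hkeys, List.map_map]
    exact List.map_congr_left (fun k _ => hval k)
  have hknd : (((PySem.Dict.ofList L).keys ++ (PySem.Dict.ofList R).keys).foldl
      (fun d k => d.insert k (PySem.Set.empty : PySem.Set String)) PySem.Dict.empty).keys.Nodup :=
    PySem.Dict.nodup_keys_foldl_insert _ _ _ (by simp)
  have hmemK : ∀ c ∈ (PySem.Dict.ofList (L ++ R)).keys,
      c ∈ (((PySem.Dict.ofList L).keys ++ (PySem.Dict.ofList R).keys).foldl
        (fun d k => d.insert k (PySem.Set.empty : PySem.Set String)) PySem.Dict.empty).keys := by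
    intro c hc
    have hK' : (PySem.Dict.ofList (L ++ R)).keys
        = PySem.Set.update PySem.Dict.empty.keys ((L ++ R).map (·.1)) :=
      PySem.Dict.keys_foldl_insert_key (L ++ R) (fun p => p.1) (fun _ p => p.2) PySem.Dict.empty
    have hL' : (PySem.Dict.ofList L).keys = PySem.Set.update PySem.Dict.empty.keys (L.map (·.1)) :=
      PySem.Dict.keys_foldl_insert_key L (fun p => p.1) (fun _ p => p.2) PySem.Dict.empty
    have hR' : (PySem.Dict.ofList R).keys = PySem.Set.update PySem.Dict.empty.keys (R.map (·.1)) :=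
      PySem.Dict.keys_foldl_insert_key R (fun p => p.1) (fun _ p => p.2) PySem.Dict.empty
    rw [hK', PySem.Set.mem_update] at hc
    rcases hc with hc | hc
    · simp at hc
    rw [PySem.Dict.keys_foldl_insert, PySem.Set.mem_update]
    right
    rw [List.map_append, List.mem_append] at hc
    rw [List.mem_append]
    rcases hc with hc | hc
    · exact Or.inl (by rw [hL', PySem.Set.mem_update]; right; exact hc)
    · exact Or.inr (by rw [hR', PySem.Set.mem_update]; right; exact hc)
  rw [hvalues]
  apply congrArg PySem.Dict.items
  exact pv_outer _ _ hknd (fun cs hcs => by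
    rw [PySem.Dict.values_eq_map_keys _ hnd PySem.Set.empty] at hcs
    obtain ⟨k, hk, hcseq⟩ := List.mem_map.mp hcs
    exact ⟨hcseq ▸ hvnd k, fun c hc => hmemK c (hvK k c (hcseq ▸ hc))⟩)

-- ===== VERDICT (by name: the statement is the Claim_ definition above) =====
theorem check_numeric_equivalence_spec : Claim_equal_check_numeric_equivalence := by
  intro L R _ _
  exact pv_main L R
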